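-- pv_equiv track=rewrite | github.com/UnWaDo/OGEN | OGEN/Topology/topology.py | remove_side_chains
-- ===== SOURCE A (Python) =====
-- from typing import Dict, List, Tuple
--
-- def remove_side_chains(connected: Dict[int, List[int]]) -> Dict[int, List[int]]:
--     one_bond = [i for i in connected if len(connected[i]) == 1]
--     while len(one_bond):
--         for i in one_bond:
--             if len(connected[i]) == 0:
--                 connected.pop(i)
--                 continue
--             j = connected[i][0]
--             connected[j].pop(connected[j].index(i))
--             connected.pop(i)
--         one_bond = [i for i in connected if len(connected[i]) == 1]
--     return connected
-- ===== SOURCE B (Python) =====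
-- # Round-based peeling: instead of popping leaves one by one (with list.index scans
-- # and per-leaf neighbour surgery), each round deletes ALL current degree-1 nodes at
-- # once and rebuilds the surviving adjacency lists by filtering against that leaf set.
-- # Like A, mutates `connected` in place and returns it.
-- def remove_side_chains(connected):
--     leaves = {i for i in connected if len(connected[i]) == 1}
--     while leaves:
--         for i in leaves:
--             del connected[i]
--         for j in connected:
--             connected[j] = [k for k in connected[j] if k not in leaves]
--         leaves = {i for i in connected if len(connected[i]) == 1}
--     return connected
-- ===== Notes on version B (the rewrite author's own statement) =====
-- stated objective: alternative
-- what changed: A pops leaves one at a time, doing list.index/pop surgery on each leaf's neighbour list; B works in synchronous rounds: it collects the whole set of degree-1 nodes, deletes them wholesale, and rebuilds the surviving adjacency lists by filtering against that set.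
-- outside the precondition, e.g. on remove_side_chains({1: [1], 2: [1, 3]}): A returns {2: [1, 3]}, B returns {}; on remove_side_chains({1: [2]}): A raises KeyError, B returns {}
import Mathlib
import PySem

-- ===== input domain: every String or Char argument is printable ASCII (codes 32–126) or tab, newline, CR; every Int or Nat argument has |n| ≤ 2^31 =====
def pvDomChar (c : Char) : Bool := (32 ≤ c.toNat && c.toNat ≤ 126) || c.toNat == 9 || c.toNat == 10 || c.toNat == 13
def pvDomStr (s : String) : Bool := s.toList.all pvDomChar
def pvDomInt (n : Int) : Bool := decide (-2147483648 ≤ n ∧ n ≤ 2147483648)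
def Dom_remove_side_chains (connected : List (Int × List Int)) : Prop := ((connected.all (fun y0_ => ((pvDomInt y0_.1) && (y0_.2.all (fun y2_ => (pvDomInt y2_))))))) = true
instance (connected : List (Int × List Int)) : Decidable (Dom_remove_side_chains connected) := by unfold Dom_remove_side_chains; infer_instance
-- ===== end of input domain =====

-- B changes the peeling schedule (whole rounds of leaves instead of one-by-one pops); both
-- Pythons mutate `connected` in place and return it — the equivalence here is about the
-- RETURN value only.

-- ===== PORT A =====
-- assoc-list renderings of the dict operations A uses:
-- connected[i] (lookup; KeyError → default [], reachable only outside Pre_)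
def agetD : List (Int × List Int) → Int → List Int
  | [], _ => []
  | (a, v) :: t, k => if a = k then v else agetD t k

-- connected.pop(i) (delete first matching key)
def aerase : List (Int × List Int) → Int → List (Int × List Int)
  | [], _ => []
  | (a, v) :: t, k => if a = k then t else (a, v) :: aerase t k

-- in-place mutation of the list object connected[j] (overwrite value, key keeps its slot)
def aset : List (Int × List Int) → Int → List Int → List (Int × List Int)
  | [], _, _ => []
  | (a, v) :: t, k, w => if a = k then (k, w) :: t else (a, v) :: aset t k w

-- lj.pop(lj.index(i)) = drop the first occurrence of i
def removeFirst : List Int → Int → List Int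
  | [], _ => []
  | a :: t, x => if a = x then t else a :: removeFirst t x

-- [i for i in connected if len(connected[i]) == 1]
def oneBond (d : List (Int × List Int)) : List Int :=
  (d.map Prod.fst).filter (fun i => (agetD d i).length = 1)

-- the body of A's `for i in one_bond` loop, for one i
def stepA (d : List (Int × List Int)) (i : Int) : List (Int × List Int) :=
  match agetD d i with
  | [] => aerase d i
  | j :: _ =>
    let lj := agetD d j
    if i ∈ lj then aerase (aset d j (removeFirst lj i)) i
    else aerase d i   -- Python raises ValueError/KeyError here; reachable only outside Pre_

theorem length_aerase_le (d : List (Int × List Int)) (k : Int) :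
    (aerase d k).length ≤ d.length := by
  induction d with
  | nil => simp [aerase]
  | cons p t ih =>
    obtain ⟨a, v⟩ := p
    by_cases h : a = k <;> simp [aerase, h] <;> omega

theorem length_aerase_lt (d : List (Int × List Int)) (k : Int)
    (h : k ∈ d.map Prod.fst) : (aerase d k).length < d.length := by
  induction d with
  | nil => simp at h
  | cons p t ih =>
    obtain ⟨a, v⟩ := p
    by_cases hak : a = k
    · simp [aerase, hak]
    · simp [aerase, hak]
      have : k ∈ t.map Prod.fst := by
        simp at h
        rcases h with h | h
        · exact absurd h.symm hak
        · simpa using h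
      have := ih this
      omega

theorem keys_aset (d : List (Int × List Int)) (k : Int) (w : List Int) :
    (aset d k w).map Prod.fst = d.map Prod.fst := by
  induction d with
  | nil => rfl
  | cons p t ih =>
    obtain ⟨a, v⟩ := p
    by_cases h : a = k <;> simp [aset, h, ih]

theorem length_aset (d : List (Int × List Int)) (k : Int) (w : List Int) :
    (aset d k w).length = d.length := by
  have := keys_aset d k w
  have h1 : (aset d k w).length = ((aset d k w).map Prod.fst).length := by simp
  have h2 : d.length = (d.map Prod.fst).length := by simp
  rw [h1, h2, this]

theorem length_stepA_le (d : List (Int × List Int)) (i : Int) :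
    (stepA d i).length ≤ d.length := by
  unfold stepA
  cases h : agetD d i with
  | nil => exact length_aerase_le d i
  | cons j rest =>
    simp only
    split
    · calc (aerase (aset d j (removeFirst (agetD d j) i)) i).length
          ≤ (aset d j (removeFirst (agetD d j) i)).length := length_aerase_le _ _
        _ = d.length := length_aset _ _ _
    · exact length_aerase_le d i

theorem length_stepA_lt (d : List (Int × List Int)) (i : Int)
    (h : i ∈ d.map Prod.fst) : (stepA d i).length < d.length := by
  unfold stepA
  cases hg : agetD d i with
  | nil => exact length_aerase_lt d i h
  | cons j rest =>
    simp only
    split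
    · have hk : i ∈ (aset d j (removeFirst (agetD d j) i)).map Prod.fst := by
        rw [keys_aset]; exact h
      calc (aerase (aset d j (removeFirst (agetD d j) i)) i).length
          < (aset d j (removeFirst (agetD d j) i)).length := length_aerase_lt _ _ hk
        _ = d.length := length_aset _ _ _
    · exact length_aerase_lt d i h

theorem length_foldl_stepA_le (L : List Int) (d : List (Int × List Int)) :
    (L.foldl stepA d).length ≤ d.length := by
  induction L generalizing d with
  | nil => simp
  | cons i L ih =>
    calc ((i :: L).foldl stepA d).length = (L.foldl stepA (stepA d i)).length := rfl
      _ ≤ (stepA d i).length := ih _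
      _ ≤ d.length := length_stepA_le d i

theorem mem_keys_of_mem_oneBond {d : List (Int × List Int)} {i : Int}
    (h : i ∈ oneBond d) : i ∈ d.map Prod.fst := by
  unfold oneBond at h
  exact (List.mem_filter.mp h).1

theorem length_foldl_stepA_lt (d : List (Int × List Int))
    (h : oneBond d ≠ []) : ((oneBond d).foldl stepA d).length < d.length := by
  cases hL : oneBond d with
  | nil => exact absurd hL h
  | cons i L =>
    have hi : i ∈ d.map Prod.fst := by
      apply mem_keys_of_mem_oneBond; rw [hL]; exact List.mem_cons_self
    calc ((i :: L).foldl stepA d).length = (L.foldl stepA (stepA d i)).length := rfl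
      _ ≤ (stepA d i).length := length_foldl_stepA_le _ _
      _ < d.length := length_stepA_lt d i hi

-- the while loop of A
def loopA (d : List (Int × List Int)) : List (Int × List Int) :=
  if h : oneBond d = [] then d
  else loopA ((oneBond d).foldl stepA d)
termination_by d.length
decreasing_by exact length_foldl_stepA_lt d h

def remove_side_chains (connected : List (Int × List Int)) : List (Int × List Int) :=
  loopA connected

-- ===== PORT B =====
-- leaves = {i for i in connected if len(connected[i]) == 1}  (a set: distinct elements)
def leavesB (d : List (Int × List Int)) : List Int :=
  PySem.Set.ofList ((d.map Prod.fst).filter (fun i => (agetD d i).length = 1))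

-- one round of B: delete every leaf, then filter every surviving list against the leaf set
def roundB (d : List (Int × List Int)) (s : List Int) : List (Int × List Int) :=
  let d1 := s.foldl aerase d
  d1.map (fun p => (p.1, p.2.filter (fun k => decide (k ∉ s))))

theorem length_foldl_aerase_le (s : List Int) (d : List (Int × List Int)) :
    (s.foldl aerase d).length ≤ d.length := by
  induction s generalizing d with
  | nil => simp
  | cons a s ih =>
    calc ((a :: s).foldl aerase d).length = (s.foldl aerase (aerase d a)).length := rfl
      _ ≤ (aerase d a).length := ih _
      _ ≤ d.length := length_aerase_le d a

theorem length_roundB_lt (d : List (Int × List Int))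
    (h : leavesB d ≠ []) : (roundB d (leavesB d)).length < d.length := by
  unfold roundB
  simp only [List.length_map]
  cases hL : leavesB d with
  | nil => exact absurd hL h
  | cons i L =>
    have hi : i ∈ d.map Prod.fst := by
      have : i ∈ leavesB d := by rw [hL]; exact List.mem_cons_self
      unfold leavesB at this
      have := (PySem.Set.mem_ofList _ _).mp this
      exact (List.mem_filter.mp this).1
    calc ((i :: L).foldl aerase d).length = (L.foldl aerase (aerase d i)).length := rfl
      _ ≤ (aerase d i).length := length_foldl_aerase_le _ _
      _ < d.length := length_aerase_lt d i hi

-- the while loop of B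
def loopB (d : List (Int × List Int)) : List (Int × List Int) :=
  if h : leavesB d = [] then d
  else loopB (roundB d (leavesB d))
termination_by d.length
decreasing_by exact length_roundB_lt d h

def remove_side_chains_alt (connected : List (Int × List Int)) : List (Int × List Int) :=
  loopB connected

-- ===== PRECONDITION & SPEC =====
-- Pre_ excludes malformed graphs (duplicate keys, a listed neighbour that is not a key, or
-- adjacency that is not multiset-symmetric) unless they contain no degree-1 node at all:
-- on such inputs A's sequential pops raise KeyError/ValueError, or, where they happen not
-- to, the surviving lists are an accident of A's pop order.
def Pre_remove_side_chains (connected : List (Int × List Int)) : Prop :=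
  (connected.map Prod.fst).Nodup ∧
  (((∀ p ∈ connected, ∀ x ∈ p.2, x ∈ connected.map Prod.fst) ∧
    (∀ p ∈ connected, ∀ q ∈ connected, p.2.count q.1 = q.2.count p.1)) ∨
   (∀ p ∈ connected, p.2.length ≠ 1))

instance (connected : List (Int × List Int)) : Decidable (Pre_remove_side_chains connected) := by
  unfold Pre_remove_side_chains; infer_instance

def pvWitness_remove_side_chains : (List (Int × List Int)) :=
  [(1, [2]), (2, [1, 3]), (3, [2])]

def Spec_remove_side_chains (connected : List (Int × List Int)) (out : List (Int × List Int)) : Prop := out = remove_side_chains_alt connected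
instance (connected : List (Int × List Int)) (out : List (Int × List Int)) : Decidable (Spec_remove_side_chains connected out) := by unfold Spec_remove_side_chains; infer_instance

-- ===== CLAIM (what is proved, stated in full; the proofs are below) =====
def Claim_equal_remove_side_chains : Prop := ∀ (connected : List (Int × List Int)), Dom_remove_side_chains connected → Pre_remove_side_chains connected → Spec_remove_side_chains connected (remove_side_chains connected)

-- ===== LEMMAS AND PROOFS =====

-- the simultaneous form of one round: drop the keys in s, filter the values against s
def strip (s : List Int) (d : List (Int × List Int)) : List (Int × List Int) :=
  (d.filter (fun p => decide (p.1 ∉ s))).map (fun p => (p.1, p.2.filter (fun k => decide (k ∉ s))))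

theorem strip_nil (d : List (Int × List Int)) : strip [] d = d := by
  unfold strip; simp

theorem strip_cons (s : List Int) (a : Int) (v : List Int) (t : List (Int × List Int)) :
    strip s ((a, v) :: t) =
      if a ∈ s then strip s t
      else (a, v.filter (fun k => decide (k ∉ s))) :: strip s t := by
  unfold strip
  by_cases h : a ∈ s <;> simp [List.filter_cons, h]

theorem agetD_of_mem {d : List (Int × List Int)} {k : Int} {v : List Int}
    (hnd : (d.map Prod.fst).Nodup) (h : (k, v) ∈ d) : agetD d k = v := by
  induction d with
  | nil => simp at h
  | cons p t ih =>
    obtain ⟨a, w⟩ := p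
    simp only [List.map_cons, List.nodup_cons] at hnd
    rcases List.mem_cons.mp h with h | h
    · obtain ⟨h1, h2⟩ := Prod.ext_iff.mp h
      simp only at h1 h2
      subst h1; subst h2
      simp [agetD]
    · by_cases hak : a = k
      · exfalso
        apply hnd.1
        rw [hak]
        exact List.mem_map.mpr ⟨(k, v), h, rfl⟩
      · simpa [agetD, hak] using ih hnd.2 h

theorem mem_of_mem_keys {d : List (Int × List Int)} {k : Int}
    (h : k ∈ d.map Prod.fst) : (k, agetD d k) ∈ d := by
  induction d with
  | nil => simp at h
  | cons p t ih =>
    obtain ⟨a, w⟩ := p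
    by_cases hak : a = k
    · subst hak
      simp [agetD]
    · have hk : k ∈ t.map Prod.fst := by
        simp at h
        rcases h with h | h
        · exact absurd h.symm hak
        · simpa using h
      have : agetD ((a, w) :: t) k = agetD t k := by simp [agetD, hak]
      rw [this]
      exact List.mem_cons_of_mem _ (ih hk)

theorem aerase_eq_filter {d : List (Int × List Int)} {k : Int}
    (hnd : (d.map Prod.fst).Nodup) : aerase d k = d.filter (fun p => decide (p.1 ≠ k)) := by
  induction d with
  | nil => rfl
  | cons p t ih =>
    obtain ⟨a, v⟩ := p
    simp only [List.map_cons, List.nodup_cons] at hnd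
    by_cases hak : a = k
    · subst hak
      simp only [aerase, if_pos rfl, List.filter_cons]
      have : (decide (((a, v) : Int × List Int).1 ≠ a)) = false := by simp
      rw [this]
      symm
      apply List.filter_eq_self.mpr
      intro p hp
      simp only [decide_eq_true_eq]
      intro hpk
      exact hnd.1 (hpk ▸ List.mem_map.mpr ⟨p, hp, rfl⟩)
    · simp [aerase, hak, List.filter_cons, ih hnd.2]

theorem aerase_noop {d : List (Int × List Int)} {k : Int}
    (h : k ∉ d.map Prod.fst) : aerase d k = d := by
  induction d with
  | nil => rfl
  | cons p t ih =>
    obtain ⟨a, v⟩ := p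
    simp only [List.map_cons, List.mem_cons] at h
    push_neg at h
    simp only [aerase, if_neg (fun hh : a = k => h.1 hh.symm)]
    rw [ih h.2]

theorem keys_strip (s : List Int) (d : List (Int × List Int)) :
    (strip s d).map Prod.fst = (d.map Prod.fst).filter (fun k => decide (k ∉ s)) := by
  unfold strip
  rw [List.map_map, List.filter_map]
  rfl

theorem nodup_keys_strip {s : List Int} {d : List (Int × List Int)}
    (hnd : (d.map Prod.fst).Nodup) : ((strip s d).map Prod.fst).Nodup := by
  rw [keys_strip]; exact hnd.filter _

theorem agetD_strip {s : List Int} {d : List (Int × List Int)} {k : Int}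
    (hk : k ∉ s) : agetD (strip s d) k = (agetD d k).filter (fun x => decide (x ∉ s)) := by
  induction d with
  | nil => simp [strip, agetD]
  | cons p t ih =>
    obtain ⟨a, v⟩ := p
    rw [strip_cons]
    by_cases has : a ∈ s
    · have hak : a ≠ k := fun h => hk (h ▸ has)
      rw [if_pos has]
      simp only [agetD, if_neg hak]
      exact ih
    · rw [if_neg has]
      by_cases hak : a = k
      · subst hak
        simp [agetD]
      · simp only [agetD, if_neg hak]
        exact ih

-- extending the strip set by i changes nothing if no surviving entry mentions i
theorem strip_extend {s : List Int} {d : List (Int × List Int)} {i : Int}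
    (hkeys : ∀ p ∈ d, p.1 ≠ i)
    (hvals : ∀ p ∈ d, p.1 ∉ s → i ∉ p.2) :
    strip (s ++ [i]) d = strip s d := by
  induction d with
  | nil => rfl
  | cons p t ih =>
    obtain ⟨a, v⟩ := p
    have ha : a ≠ i := hkeys (a, v) List.mem_cons_self
    have ihs := ih (fun p hp => hkeys p (List.mem_cons_of_mem _ hp))
      (fun p hp hps => hvals p (List.mem_cons_of_mem _ hp) hps)
    rw [strip_cons, strip_cons]
    by_cases has : a ∈ s
    · have hc : a ∈ s ++ [i] := by simp [has]
      rw [if_pos hc, if_pos has]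
      exact ihs
    · have has' : a ∉ s ++ [i] := by simp [has, ha]
      rw [if_neg has', if_neg has]
      have hiv : i ∉ v := hvals (a, v) List.mem_cons_self has
      have hfv : v.filter (fun k => decide (k ∉ s ++ [i])) = v.filter (fun k => decide (k ∉ s)) := by
        apply List.filter_congr
        intro x hx
        have hxi : x ≠ i := fun h => hiv (h ▸ hx)
        simp [hxi]
      rw [hfv, ihs]

theorem aerase_strip {s : List Int} {d : List (Int × List Int)} {i : Int}
    (hnd : (d.map Prod.fst).Nodup)
    (hvals : ∀ p ∈ d, p.1 ∉ s → p.1 ≠ i → i ∉ p.2) :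
    aerase (strip s d) i = strip (s ++ [i]) d := by
  induction d with
  | nil => rfl
  | cons p t ih =>
    obtain ⟨a, v⟩ := p
    simp only [List.map_cons, List.nodup_cons] at hnd
    have iht := ih hnd.2 (fun p hp h1 h2 => hvals p (List.mem_cons_of_mem _ hp) h1 h2)
    rw [strip_cons, strip_cons]
    by_cases has : a ∈ s
    · have hc : a ∈ s ++ [i] := by simp [has]
      rw [if_pos has, if_pos hc]
      exact iht
    · by_cases hai : a = i
      · subst hai
        have hc : a ∈ s ++ [a] := by simp
        rw [if_neg has, if_pos hc]
        simp only [aerase, if_pos rfl, if_true]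
        symm
        apply strip_extend
        · intro p hp hpa
          exact hnd.1 (hpa ▸ List.mem_map.mpr ⟨p, hp, rfl⟩)
        · intro p hp hps
          have hpa : p.1 ≠ a := fun h => hnd.1 (h ▸ List.mem_map.mpr ⟨p, hp, rfl⟩)
          exact hvals p (List.mem_cons_of_mem _ hp) hps hpa
      · have hc : a ∉ s ++ [i] := by simp [has, hai]
        rw [if_neg has, if_neg hc]
        simp only [aerase, if_neg hai]
        have hiv : i ∉ v := hvals (a, v) List.mem_cons_self has hai
        have hfv : v.filter (fun k => decide (k ∉ s)) = v.filter (fun k => decide (k ∉ s ++ [i])) := by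
          apply List.filter_congr
          intro x hx
          have hxi : x ≠ i := fun h => hiv (h ▸ hx)
          simp [hxi]
        rw [hfv, iht]

theorem removeFirst_of_count_le_one {l : List Int} {x : Int}
    (h : l.count x ≤ 1) : removeFirst l x = l.filter (fun y => decide (y ≠ x)) := by
  induction l with
  | nil => rfl
  | cons a t ih =>
    by_cases hax : a = x
    · subst hax
      simp only [removeFirst, if_pos rfl, List.filter_cons]
      have : (decide (a ≠ a)) = false := by simp
      rw [this]
      rw [List.count_cons_self] at h
      have ht : t.count a = 0 := by omega
      symm
      apply List.filter_eq_self.mpr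
      intro y hy
      simp only [decide_eq_true_eq]
      intro hya
      rw [List.count_eq_zero] at ht
      exact ht (hya ▸ hy)
    · have hc : t.count x ≤ 1 := by
        rw [List.count_cons_of_ne hax] at h
        exact h
      simp [removeFirst, hax, List.filter_cons, ih hc]

-- the core step: on a leaf i with (stripped-state) neighbour j, A's pop-and-erase equals
-- stripping by one more node
theorem step_strip_aux (P : List Int) (i j : Int) (w : List Int) :
    ∀ d : List (Int × List Int), (d.map Prod.fst).Nodup →
    (∀ p ∈ d, p.1 = j → w = p.2.filter (fun x => decide (x ∉ P ++ [i]))) →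
    (∀ p ∈ d, p.1 ≠ j → p.2.count i = 0) →
    aerase (aset (strip P d) j w) i = strip (P ++ [i]) d := by
  intro d
  induction d with
  | nil => intro _ _ _; rfl
  | cons p t ih =>
    intro hnd Hj H0
    obtain ⟨a, v⟩ := p
    simp only [List.map_cons, List.nodup_cons] at hnd
    have iht := ih hnd.2 (fun p hp h => Hj p (List.mem_cons_of_mem _ hp) h)
      (fun p hp h => H0 p (List.mem_cons_of_mem _ hp) h)
    rw [strip_cons, strip_cons]
    by_cases haP : a ∈ P
    · have hc : a ∈ P ++ [i] := by simp [haP]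
      rw [if_pos haP, if_pos hc]
      exact iht
    · rw [if_neg haP]
      by_cases haj : a = j
      · subst haj
        simp only [aset, if_pos rfl, if_true]
        by_cases hij : i = a
        · -- the leaf IS its own neighbour's entry (self loop)
          subst hij
          have hc : i ∈ P ++ [i] := by simp
          rw [if_pos hc]
          simp only [aerase, if_pos rfl, if_true]
          symm
          apply strip_extend
          · intro p hp hpa
            exact hnd.1 (hpa ▸ List.mem_map.mpr ⟨p, hp, rfl⟩)
          · intro p hp _
            have hpa : p.1 ≠ i := fun h => hnd.1 (h ▸ List.mem_map.mpr ⟨p, hp, rfl⟩)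
            exact List.count_eq_zero.mp (H0 p (List.mem_cons_of_mem _ hp) hpa)
        · have hc : a ∉ P ++ [i] := by simp [haP]; exact fun h => hij h.symm
          rw [if_neg hc]
          simp only [aerase, if_neg (fun h : a = i => hij h.symm)]
          have hw : w = v.filter (fun x => decide (x ∉ P ++ [i])) :=
            Hj (a, v) List.mem_cons_self rfl
          rw [hw]
          congr 1
          apply aerase_strip hnd.2
          intro p hp _ _
          have hpa : p.1 ≠ a := fun h => hnd.1 (h ▸ List.mem_map.mpr ⟨p, hp, rfl⟩)
          exact List.count_eq_zero.mp (H0 p (List.mem_cons_of_mem _ hp) hpa)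
      · simp only [aset, if_neg haj]
        by_cases hai : a = i
        · subst hai
          have hc : a ∈ P ++ [a] := by simp
          rw [if_pos hc]
          simp only [aerase, if_pos rfl, if_true]
          -- a's own entry is erased; the pending aset on the tail finds no key j to touch…
          -- …no: j may well be in t.  The erase of a leaves exactly the tail computation,
          -- and erasing a (∉ tail keys) later is a no-op, so reuse iht through aerase_noop.
          have hkeys : a ∉ (aset (strip P t) j w).map Prod.fst := by
            rw [keys_aset, keys_strip]
            intro h
            exact hnd.1 (List.mem_of_mem_filter h)
          calc aset (strip P t) j w
              = aerase (aset (strip P t) j w) a := (aerase_noop hkeys).symm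
            _ = strip (P ++ [a]) t := iht
        · have hc : a ∉ P ++ [i] := by simp [haP, hai]
          rw [if_neg hc]
          simp only [aerase, if_neg hai]
          have hiv : i ∉ v := List.count_eq_zero.mp (H0 (a, v) List.mem_cons_self haj)
          have hfv : v.filter (fun k => decide (k ∉ P)) = v.filter (fun k => decide (k ∉ P ++ [i])) := by
            apply List.filter_congr
            intro x hx
            have hxi : x ≠ i := fun h => hiv (h ▸ hx)
            simp [hxi]
          rw [hfv, iht]

-- one full pass of A's for-loop equals the simultaneous strip
theorem foldl_stepA_eq_strip {d : List (Int × List Int)}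
    (hnd : (d.map Prod.fst).Nodup)
    (hclosed : ∀ p ∈ d, ∀ x ∈ p.2, x ∈ d.map Prod.fst)
    (hmsym : ∀ p ∈ d, ∀ q ∈ d, p.2.count q.1 = q.2.count p.1) :
    ∀ Q P, oneBond d = P ++ Q → Q.foldl stepA (strip P d) = strip (oneBond d) d := by
  intro Q
  induction Q with
  | nil =>
    intro P hQ
    simp only [List.foldl_nil]
    rw [hQ, List.append_nil]
  | cons i Q ih =>
    intro P hQ
    have hobnd : (oneBond d).Nodup := by
      unfold oneBond
      exact hnd.filter _
    have hiP : i ∉ P := by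
      rw [hQ] at hobnd
      simp only [List.nodup_append] at hobnd
      intro h
      exact (hobnd.2.2 i h i List.mem_cons_self) rfl
    have hiob : i ∈ oneBond d := by rw [hQ]; simp
    have hiK : i ∈ d.map Prod.fst := mem_keys_of_mem_oneBond hiob
    have hlen : (agetD d i).length = 1 := by
      unfold oneBond at hiob
      simpa using (List.mem_filter.mp hiob).2
    obtain ⟨j, hadj⟩ : ∃ j, agetD d i = [j] := by
      cases hg : agetD d i with
      | nil => rw [hg] at hlen; simp at hlen
      | cons j r =>
        rw [hg] at hlen
        simp at hlen
        exact ⟨j, by rw [hlen]⟩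
    have hmemi : (i, [j]) ∈ d := hadj ▸ mem_of_mem_keys hiK
    have hjK : j ∈ d.map Prod.fst := hclosed (i, [j]) hmemi j (by simp)
    have hmemj : (j, agetD d j) ∈ d := mem_of_mem_keys hjK
    have hcnt1 : (agetD d j).count i = 1 := by
      have := hmsym (j, agetD d j) hmemj (i, [j]) hmemi
      simpa using this
    have hcnt0 : ∀ p ∈ d, p.1 ≠ j → p.2.count i = 0 := by
      intro p hp hpj
      have := hmsym p hp (i, [j]) hmemi
      simpa [List.count_singleton, Ne.symm hpj] using this
    have hstep : stepA (strip P d) i = strip (P ++ [i]) d := by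
      unfold stepA
      rw [agetD_strip hiP, hadj]
      by_cases hjP : j ∈ P
      · rw [show ([j].filter (fun x => decide (x ∉ P))) = [] by simp [hjP]]
        apply aerase_strip hnd
        intro p hp hps _
        have hpj : p.1 ≠ j := fun h => hps (h ▸ hjP)
        exact List.count_eq_zero.mp (hcnt0 p hp hpj)
      · rw [show ([j].filter (fun x => decide (x ∉ P))) = [j] by simp [hjP]]
        simp only
        rw [agetD_strip hjP]
        have hmemlj : i ∈ (agetD d j).filter (fun x => decide (x ∉ P)) := by
          apply List.mem_filter.mpr
          refine ⟨List.count_pos_iff.mp (by omega : 0 < (agetD d j).count i), by simp [hiP]⟩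
        rw [if_pos hmemlj]
        apply step_strip_aux
        · exact hnd
        · intro p hp hpj
          have : agetD d j = p.2 := by
            obtain ⟨p1, p2⟩ := p
            simp only at hpj
            subst hpj
            exact agetD_of_mem hnd hp
          rw [← this]
          -- removeFirst of the single i = filter it away
          have hcf : ((agetD d j).filter (fun x => decide (x ∉ P))).count i = 1 := by
            rw [List.count_filter (by simp [hiP])]
            exact hcnt1
          rw [removeFirst_of_count_le_one (le_of_eq hcf), List.filter_filter]
          apply List.filter_congr
          intro x _
          by_cases h1 : x = i <;> by_cases h2 : x ∈ P <;> simp [h1, h2]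
        · exact hcnt0
    calc (i :: Q).foldl stepA (strip P d) = Q.foldl stepA (stepA (strip P d) i) := rfl
      _ = Q.foldl stepA (strip (P ++ [i]) d) := by rw [hstep]
      _ = strip (oneBond d) d := ih (P ++ [i]) (by rw [hQ]; simp)

theorem foldl_aerase_eq_filter {d : List (Int × List Int)}
    (hnd : (d.map Prod.fst).Nodup) (s : List Int) :
    s.foldl aerase d = d.filter (fun p => decide (p.1 ∉ s)) := by
  induction s generalizing d with
  | nil =>
    simp only [List.foldl_nil]
    symm
    apply List.filter_eq_self.mpr
    intro p _
    simp
  | cons a s ih =>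
    have h1 : (a :: s).foldl aerase d = s.foldl aerase (aerase d a) := rfl
    have hnd' : ((aerase d a).map Prod.fst).Nodup := by
      rw [aerase_eq_filter hnd]
      exact hnd.sublist (List.Sublist.map Prod.fst List.filter_sublist)
    rw [h1, ih hnd', aerase_eq_filter hnd, List.filter_filter]
    apply List.filter_congr
    intro p _
    by_cases h1 : p.1 = a <;> by_cases h2 : p.1 ∈ s <;> simp [h1, h2]

theorem roundB_eq_strip {d : List (Int × List Int)}
    (hnd : (d.map Prod.fst).Nodup) (s : List Int) :
    roundB d s = strip s d := by
  unfold roundB strip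
  rw [foldl_aerase_eq_filter hnd]

-- well-formedness is preserved by strip
theorem closed_strip {s : List Int} {d : List (Int × List Int)}
    (hclosed : ∀ p ∈ d, ∀ x ∈ p.2, x ∈ d.map Prod.fst) :
    ∀ p ∈ strip s d, ∀ x ∈ p.2, x ∈ (strip s d).map Prod.fst := by
  intro p hp x hx
  unfold strip at hp
  obtain ⟨q, hq, rfl⟩ := List.mem_map.mp hp
  have hqd := List.mem_of_mem_filter hq
  simp only at hx
  have hxq := List.mem_of_mem_filter hx
  have hxs : x ∉ s := by
    have := List.of_mem_filter hx
    simpa using this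
  rw [keys_strip]
  apply List.mem_filter.mpr
  exact ⟨hclosed q hqd x hxq, by simpa using hxs⟩

theorem msym_strip {s : List Int} {d : List (Int × List Int)}
    (hmsym : ∀ p ∈ d, ∀ q ∈ d, p.2.count q.1 = q.2.count p.1) :
    ∀ p ∈ strip s d, ∀ q ∈ strip s d, p.2.count q.1 = q.2.count p.1 := by
  intro p hp q hq
  unfold strip at hp hq
  obtain ⟨p', hp', rfl⟩ := List.mem_map.mp hp
  obtain ⟨q', hq', rfl⟩ := List.mem_map.mp hq
  have hps : p'.1 ∉ s := by simpa using List.of_mem_filter hp'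
  have hqs : q'.1 ∉ s := by simpa using List.of_mem_filter hq'
  simp only [List.count_filter]
  simp [hps, hqs]
  exact hmsym p' (List.mem_of_mem_filter hp') q' (List.mem_of_mem_filter hq')

theorem length_strip_lt {d : List (Int × List Int)}
    (h : oneBond d ≠ []) : (strip (oneBond d) d).length < d.length := by
  unfold strip
  rw [List.length_map]
  cases hL : oneBond d with
  | nil => exact absurd hL h
  | cons i L =>
    have hiob : i ∈ oneBond d := by rw [hL]; exact List.mem_cons_self
    have hiK : i ∈ d.map Prod.fst := mem_keys_of_mem_oneBond hiob
    rw [← hL]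
    have hmem : (i, agetD d i) ∈ d := mem_of_mem_keys hiK
    have : ¬ ((fun p : Int × List Int => decide (p.1 ∉ oneBond d)) (i, agetD d i) = true) := by
      simp [hiob]
    calc (d.filter (fun p => decide (p.1 ∉ oneBond d))).length
        < d.length := by
          apply List.length_filter_lt_length_iff_exists.mpr
          exact ⟨(i, agetD d i), hmem, this⟩

theorem loop_eq : ∀ n (d : List (Int × List Int)), d.length ≤ n →
    (d.map Prod.fst).Nodup →
    ((∀ p ∈ d, ∀ x ∈ p.2, x ∈ d.map Prod.fst) ∧
      (∀ p ∈ d, ∀ q ∈ d, p.2.count q.1 = q.2.count p.1)) ∨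
      (∀ p ∈ d, p.2.length ≠ 1) →
    loopA d = loopB d := by
  intro n
  induction n with
  | zero =>
    intro d hlen _ _
    have : d = [] := List.length_eq_zero_iff.mp (Nat.le_zero.mp hlen)
    subst this
    rw [loopA, loopB, dif_pos (show oneBond [] = [] from rfl),
      dif_pos (show leavesB [] = [] from rfl)]
  | succ n ih =>
    intro d hlen hnd hwf
    have hleaves : leavesB d = oneBond d := by
      unfold leavesB oneBond
      exact PySem.Set.ofList_eq_self_of_nodup _ (hnd.filter _)
    by_cases hob : oneBond d = []
    · rw [loopA, loopB, dif_pos hob, dif_pos (by rw [hleaves]; exact hob)]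
    · -- a leaf exists, so the no-leaf disjunct is impossible: we are in the wf case
      obtain ⟨hclosed, hmsym⟩ : (∀ p ∈ d, ∀ x ∈ p.2, x ∈ d.map Prod.fst) ∧
          (∀ p ∈ d, ∀ q ∈ d, p.2.count q.1 = q.2.count p.1) := by
        rcases hwf with hwf | hnl
        · exact hwf
        · exfalso
          cases hL : oneBond d with
          | nil => exact hob hL
          | cons i L =>
            have hiob : i ∈ oneBond d := by rw [hL]; exact List.mem_cons_self
            have hiK : i ∈ d.map Prod.fst := mem_keys_of_mem_oneBond hiob
            have hlen1 : (agetD d i).length = 1 := by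
              unfold oneBond at hiob
              simpa using (List.mem_filter.mp hiob).2
            exact hnl (i, agetD d i) (mem_of_mem_keys hiK) hlen1
      rw [loopA, loopB, dif_neg hob, dif_neg (by rw [hleaves]; exact hob)]
      have hA : (oneBond d).foldl stepA d = strip (oneBond d) d := by
        have h := foldl_stepA_eq_strip hnd hclosed hmsym (oneBond d) [] (by simp)
        rwa [strip_nil] at h
      rw [hleaves, roundB_eq_strip hnd, hA]
      apply ih
      · have := length_strip_lt hob
        omega
      · exact nodup_keys_strip hnd
      · exact Or.inl ⟨closed_strip hclosed, msym_strip hmsym⟩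

-- ===== VERDICT (by name: the statement is the Claim_ definition above) =====
theorem remove_side_chains_spec : Claim_equal_remove_side_chains := by
  intro d _ hpre
  unfold Spec_remove_side_chains remove_side_chains remove_side_chains_alt
  exact loop_eq d.length d le_rfl hpre.1 hpre.2
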